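-- pv_equiv track=rewrite | github.com/tesSer16/practice | temp/fact_check.py | check
-- ===== SOURCE A (Python) =====
-- def check(num, dic):
--     if len(dic) <= 1:
--         return False
--
--     str_num = str(num)
--     for item in dic.items():
--         for i in item:
--             if i == 1:
--                 continue
--             str_i = str(i)
--             if str_num.startswith(str_i):
--                 str_num = str_num[len(str_i):]
--             else:
--                 return False
--
--     if str_num:
--         return False
--     else:
--         return True
-- ===== SOURCE B (Python) =====
-- def check(num, dic):
--     if len(dic) <= 1:
--         return False
--     expected = "".join(str(i) for item in dic.items() for i in item if i != 1)
--     return str(num) == expected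
-- ===== Notes on version B (the rewrite author's own statement) =====
-- stated objective: simpler
-- what changed: Replaces A's stateful prefix-consumption loop (startswith + slice with early return) by building the full expected digit string once and comparing it to str(num) for equality.
import Mathlib
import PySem

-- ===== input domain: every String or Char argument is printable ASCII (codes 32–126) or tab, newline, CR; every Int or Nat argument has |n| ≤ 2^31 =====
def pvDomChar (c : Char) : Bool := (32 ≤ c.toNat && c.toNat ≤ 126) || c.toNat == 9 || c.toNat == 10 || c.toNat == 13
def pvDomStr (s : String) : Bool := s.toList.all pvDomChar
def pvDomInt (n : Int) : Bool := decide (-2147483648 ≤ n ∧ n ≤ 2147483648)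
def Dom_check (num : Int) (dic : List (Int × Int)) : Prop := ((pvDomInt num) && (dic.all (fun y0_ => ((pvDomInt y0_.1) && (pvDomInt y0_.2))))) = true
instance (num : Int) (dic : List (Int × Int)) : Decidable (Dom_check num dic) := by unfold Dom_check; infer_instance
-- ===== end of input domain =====

-- B builds the expected digit string once and compares for equality; A consumes prefixes with early return.

-- ===== PORT A =====
-- 'if i == 1: continue; if str_num.startswith(str_i): str_num = str_num[len(str_i):]; else: return False'
-- (early return modelled as Option: none = returned False)
def checkConsume (i : Int) (s : List Char) : Option (List Char) :=
  if i == 1 then some s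
  else
    let si := PySem.Int.toChars i
    if si.isPrefixOf s then some (s.drop si.length) else none

-- the loop 'for item in dic.items(): for i in item: …', tuple iteration unrolled to its two elements,
-- followed by the final 'if str_num: return False else: return True'
def checkLoop (l : List (Int × Int)) (s : List Char) : Bool :=
  match l with
  | [] => s.isEmpty
  | p :: rest =>
    match checkConsume p.1 s with
    | none => false
    | some s1 =>
      match checkConsume p.2 s1 with
      | none => false
      | some s2 => checkLoop rest s2

def check (num : Int) (dic : List (Int × Int)) : Bool :=
  if dic.length ≤ 1 then false
  else checkLoop dic (PySem.Int.toChars num)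

-- ===== PORT B =====
def check_alt (num : Int) (dic : List (Int × Int)) : Bool :=
  if dic.length ≤ 1 then false
  else
    let expected :=
      ((dic.flatMap (fun item => [item.1, item.2])).filter (fun i => i != 1)).flatMap
        PySem.Int.toChars
    PySem.Int.toChars num == expected

-- ===== PRECONDITION & SPEC =====
def Spec_check (num : Int) (dic : List (Int × Int)) (out : Bool) : Prop := out = check_alt num dic
instance (num : Int) (dic : List (Int × Int)) (out : Bool) : Decidable (Spec_check num dic out) := by unfold Spec_check; infer_instance

-- ===== CLAIM (what is proved, stated in full; the proofs are below) =====
def Claim_equal_check : Prop := ∀ (num : Int) (dic : List (Int × Int)), Dom_check num dic → Spec_check num dic (check num dic)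

-- ===== LEMMAS AND PROOFS =====

-- the digit string one element contributes
def pieceOf (i : Int) : List Char := if i = 1 then [] else PySem.Int.toChars i

lemma consume_bind (i : Int) (s : List Char) (g : List Char → Bool) (Q : List Char)
    (hg : ∀ t, g t = (t == Q)) :
    (match checkConsume i s with | none => false | some t => g t)
      = (s == pieceOf i ++ Q) := by
  unfold checkConsume pieceOf
  by_cases h1 : i = 1
  · simp [h1, hg]
  · simp only [h1, beq_iff_eq, if_false]
    by_cases hp : (PySem.Int.toChars i) <+: s
    · obtain ⟨t, rfl⟩ := hp
      have : (PySem.Int.toChars i).isPrefixOf (PySem.Int.toChars i ++ t) = true := by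
        simp [List.isPrefixOf_iff_prefix]
      simp [this, hg]
    · have hb : (PySem.Int.toChars i).isPrefixOf s = false := by
        rw [Bool.eq_false_iff]
        exact fun h => hp (List.isPrefixOf_iff_prefix.mp h)
      have hne : s ≠ PySem.Int.toChars i ++ Q := fun he => hp (he ▸ List.prefix_append _ _)
      rw [hb]
      show false = (s == PySem.Int.toChars i ++ Q)
      exact (beq_eq_false_iff_ne.mpr hne).symm

lemma checkLoop_eq (l : List (Int × Int)) (s : List Char) :
    checkLoop l s = (s == l.flatMap (fun p => pieceOf p.1 ++ pieceOf p.2)) := by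
  induction l generalizing s with
  | nil => cases s <;> simp [checkLoop]
  | cons p rest ih =>
    show (match checkConsume p.1 s with
          | none => false
          | some s1 =>
            match checkConsume p.2 s1 with
            | none => false
            | some s2 => checkLoop rest s2) = _
    rw [consume_bind p.1 s _ (pieceOf p.2 ++ rest.flatMap (fun p => pieceOf p.1 ++ pieceOf p.2))
      (fun s1 => consume_bind p.2 s1 _ _ (fun t => ih t))]
    simp [List.flatMap_cons, List.append_assoc]

lemma expected_eq (l : List (Int × Int)) :
    ((l.flatMap (fun item => [item.1, item.2])).filter (fun i => i != 1)).flatMap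
        PySem.Int.toChars
      = l.flatMap (fun p => pieceOf p.1 ++ pieceOf p.2) := by
  induction l with
  | nil => simp
  | cons p rest ih =>
    by_cases h1 : p.1 = 1 <;> by_cases h2 : p.2 = 1 <;>
      simp [pieceOf, h1, h2, ih]

-- ===== VERDICT (by name: the statement is the Claim_ definition above) =====
theorem check_spec : Claim_equal_check := by
  intro num dic _
  unfold Spec_check check check_alt
  by_cases h : dic.length ≤ 1
  · simp [h]
  · simp only [h, if_false]
    rw [checkLoop_eq, expected_eq]
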